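-- pv_equiv track=rewrite | github.com/TanveerAhmedKhan/maritime-pilot-optimization | pilot_boat_assistance_analysis.py | get_primary_traffic_direction
-- ===== SOURCE A (Python) =====
-- def get_primary_traffic_direction(directions_list):
--     """
--     Determine the primary traffic direction from a list of directions.
--
--     Args:
--         directions_list: List of traffic direction strings
--
--     Returns:
--         String: Most common direction, or "mixed" if tie
--     """
--     if not directions_list:
--         return "other"
--
--     # Count occurrences of each direction
--     direction_counts = {}
--     for direction in directions_list:
--         direction_counts[direction] = direction_counts.get(direction, 0) + 1
--
--     # Find the most common direction
--     max_count = max(direction_counts.values())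
--     most_common = [direction for direction, count in direction_counts.items() if count == max_count]
--
--     # Return single direction or "mixed" if tie
--     if len(most_common) == 1:
--         return most_common[0]
--     else:
--         return "mixed"
-- ===== SOURCE B (Python) =====
-- def get_primary_traffic_direction(directions_list):
--     """One-pass variant: maintain counts plus a running max_count and the set of
--     current leaders; no separate max()/filter passes over the finished dict."""
--     if not directions_list:
--         return "other"
--
--     counts = {}
--     max_count = 0
--     leaders = set()
--     for direction in directions_list:
--         c = counts.get(direction, 0) + 1
--         counts[direction] = c
--         if c > max_count:
--             max_count = c
--             leaders = {direction}
--         elif c == max_count: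
--             leaders.add(direction)
--
--     if len(leaders) == 1:
--         return next(iter(leaders))
--     return "mixed"
-- ===== Notes on version B (the rewrite author's own statement) =====
-- stated objective: alternative
-- what changed: A builds a counts dict and then makes three more passes over it (max() over the values, a list-comprehension filter for the argmax keys, a length check); B does everything in the single counting loop by maintaining running max_count and leaders-set accumulators, so no pass over the finished dict remains.
import Mathlib
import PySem

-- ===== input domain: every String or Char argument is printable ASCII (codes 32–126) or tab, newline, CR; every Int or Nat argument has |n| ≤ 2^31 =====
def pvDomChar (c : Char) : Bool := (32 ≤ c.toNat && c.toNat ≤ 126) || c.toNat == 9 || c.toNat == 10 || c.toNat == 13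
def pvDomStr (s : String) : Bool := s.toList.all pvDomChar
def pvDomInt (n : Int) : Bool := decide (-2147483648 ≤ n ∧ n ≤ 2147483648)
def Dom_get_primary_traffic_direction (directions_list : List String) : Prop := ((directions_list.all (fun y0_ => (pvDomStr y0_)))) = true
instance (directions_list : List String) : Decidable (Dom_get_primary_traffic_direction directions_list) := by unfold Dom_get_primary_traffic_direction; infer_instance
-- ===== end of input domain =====

-- B fuses A's three passes over the finished counts dict (max(), list-comprehension
-- filter, len check) into the single counting loop via running (max_count, leaders) accumulators.

-- ===== PORT A =====
def get_primary_traffic_direction (directions_list : List String) : String :=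
  if directions_list = [] then "other"
  else
    -- direction_counts[direction] = direction_counts.get(direction, 0) + 1
    let direction_counts : PySem.Dict String Int :=
      directions_list.foldl (fun d x => d.insert x (d.getD x 0 + 1)) PySem.Dict.empty
    -- max(direction_counts.values()): the dict is nonempty here, so max() cannot raise
    match PySem.List.max? direction_counts.values (fun v => v) with
    | none => ""  -- unreachable (empty dict only when directions_list = [])
    | some max_count =>
      let most_common :=
        (direction_counts.items.filter (fun p => p.2 == max_count)).map (fun p => p.1)
      if most_common.length = 1 then PySem.List.pyGetD most_common 0 "" else "mixed"

-- ===== PORT B =====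
-- one loop iteration of Source B: update the count of `direction`, then the running max/leaders
def pvAltStep (st : PySem.Dict String Int × Int × PySem.Set String) (direction : String) :
    PySem.Dict String Int × Int × PySem.Set String :=
  let c := st.1.getD direction 0 + 1
  let counts := st.1.insert direction c
  if st.2.1 < c then (counts, c, [direction])
  else if c = st.2.1 then (counts, st.2.1, PySem.Set.add st.2.2 direction)
  else (counts, st.2.1, st.2.2)

def get_primary_traffic_direction_alt (directions_list : List String) : String :=
  if directions_list = [] then "other"
  else
    let st := directions_list.foldl pvAltStep (PySem.Dict.empty, 0, PySem.Set.empty)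
    let leaders := st.2.2
    -- next(iter(leaders)) is only taken when the set is a singleton, so it is order-independent
    if PySem.Set.len leaders = 1 then leaders.headD "" else "mixed"

-- ===== PRECONDITION & SPEC =====
def Spec_get_primary_traffic_direction (directions_list : List String) (out : String) : Prop := out = get_primary_traffic_direction_alt directions_list
instance (directions_list : List String) (out : String) : Decidable (Spec_get_primary_traffic_direction directions_list out) := by unfold Spec_get_primary_traffic_direction; infer_instance

-- ===== CLAIM (what is proved, stated in full; the proofs are below) =====
def Claim_equal_get_primary_traffic_direction : Prop := ∀ (directions_list : List String), Dom_get_primary_traffic_direction directions_list → Spec_get_primary_traffic_direction directions_list (get_primary_traffic_direction directions_list)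

-- ===== LEMMAS AND PROOFS =====

-- Invariant of B's loop after processing a nonempty prefix p: the leaders list is
-- duplicate-free and nonempty, holds exactly the keys whose count in p equals the
-- running max, and the running max bounds every count.
def pvInv (p : List String) (st : PySem.Dict String Int × Int × PySem.Set String) : Prop :=
  st.2.2.Nodup ∧ st.2.2 ≠ [] ∧
  (∀ k, k ∈ st.2.2 ↔ k ∈ p ∧ (p.count k : Int) = st.2.1) ∧
  (∀ k ∈ p, (p.count k : Int) ≤ st.2.1)

-- the dict component of B's loop is exactly A's counting loop
lemma pvAlt_dict' (p : List String) : ∀ st,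
    (p.foldl pvAltStep st).1 = p.foldl (fun d x => d.insert x (d.getD x 0 + 1)) st.1 := by
  induction p with
  | nil => intro st; rfl
  | cons x t ih =>
    intro st
    simp only [List.foldl_cons]
    rw [ih]
    congr 1
    simp only [pvAltStep]
    split_ifs <;> rfl

lemma pvCount_app_self (q : List String) (x : String) :
    (q ++ [x]).count x = q.count x + 1 := by
  simp [List.count_append]

lemma pvCount_app_ne (q : List String) (x k : String) (h : k ≠ x) :
    (q ++ [x]).count k = q.count k := by
  simp [List.count_append, List.count_nil, h.symm]

lemma pvMem_app (q : List String) (x k : String) (h : k ≠ x) (hk : k ∈ q ++ [x]) : k ∈ q := by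
  rcases List.mem_append.1 hk with h' | h'
  · exact h'
  · simp at h'; exact absurd h' h

lemma pvInv_holds (p : List String) (h : p ≠ []) :
    pvInv p (p.foldl pvAltStep (PySem.Dict.empty, 0, PySem.Set.empty)) := by
  induction p using List.reverseRecOn with
  | nil => exact absurd rfl h
  | append_singleton q x ih =>
    rw [List.foldl_append, List.foldl_cons, List.foldl_nil]
    rcases eq_or_ne q [] with hq | hq
    · subst hq
      simp only [List.foldl_nil, pvInv, pvAltStep]
      norm_num [PySem.Dict.getD_empty]
    · have hI := ih hq
      set st := q.foldl pvAltStep (PySem.Dict.empty, 0, PySem.Set.empty) with hst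
      obtain ⟨hnd, hne, hmem, hbound⟩ := hI
      have hc : st.1.getD x 0 = (q.count x : Int) := by
        rw [pvAlt_dict']
        simpa using PySem.Dict.getD_foldl_insert_add_one (l := q) (v := x) (d := PySem.Dict.empty)
      simp only [pvAltStep, hc]
      split_ifs with h1 h2 <;> simp only [pvInv]
      · -- new strict max at x
        refine ⟨List.nodup_singleton x, by simp, ?_, ?_⟩
        · intro k
          simp only [List.mem_singleton]
          constructor
          · rintro rfl
            exact ⟨by simp, by rw [pvCount_app_self]; push_cast; ring⟩
          · rintro ⟨hkp, hkc⟩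
            by_contra hkx
            rw [pvCount_app_ne q x k hkx] at hkc
            have := hbound k (pvMem_app q x k hkx hkp)
            omega
        · intro k hk
          rcases eq_or_ne k x with rfl | hkx
          · rw [pvCount_app_self]; push_cast; omega
          · rw [pvCount_app_ne q x k hkx]
            have := hbound k (pvMem_app q x k hkx hk)
            omega
      · -- count reaches the current max: x joins the leaders
        refine ⟨PySem.Set.nodup_add st.2.2 x hnd, ?_, ?_, ?_⟩
        · have hx : x ∈ PySem.Set.add st.2.2 x := (PySem.Set.mem_add _ _ _).2 (Or.inr rfl)
          intro hcon; rw [hcon] at hx; simp at hx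
        · intro k
          rw [PySem.Set.mem_add]
          constructor
          · rintro (hk | rfl)
            · obtain ⟨hkq, hkc⟩ := (hmem k).1 hk
              have hkx : k ≠ x := by rintro rfl; omega
              exact ⟨List.mem_append.2 (Or.inl hkq), by rw [pvCount_app_ne q x k hkx]; omega⟩
            · exact ⟨by simp, by rw [pvCount_app_self]; push_cast; omega⟩
          · rintro ⟨hkp, hkc⟩
            rcases eq_or_ne k x with rfl | hkx
            · exact Or.inr rfl
            · rw [pvCount_app_ne q x k hkx] at hkc
              exact Or.inl ((hmem k).2 ⟨pvMem_app q x k hkx hkp, hkc⟩)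
        · intro k hk
          rcases eq_or_ne k x with rfl | hkx
          · rw [pvCount_app_self]; push_cast; omega
          · rw [pvCount_app_ne q x k hkx]
            exact hbound k (pvMem_app q x k hkx hk)
      · -- still below the max: leaders and max unchanged
        have hlt : (q.count x : Int) + 1 < st.2.1 := by omega
        refine ⟨hnd, hne, ?_, ?_⟩
        · intro k
          rw [hmem k]
          rcases eq_or_ne k x with rfl | hkx
          · rw [pvCount_app_self]
            constructor
            · rintro ⟨_, hkc⟩; omega
            · rintro ⟨_, hkc⟩; push_cast at hkc; omega
          · rw [pvCount_app_ne q x k hkx]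
            constructor
            · rintro ⟨hkq, hkc⟩; exact ⟨List.mem_append.2 (Or.inl hkq), hkc⟩
            · rintro ⟨hkp, hkc⟩; exact ⟨pvMem_app q x k hkx hkp, hkc⟩
        · intro k hk
          rcases eq_or_ne k x with rfl | hkx
          · rw [pvCount_app_self]; push_cast; omega
          · rw [pvCount_app_ne q x k hkx]
            exact hbound k (pvMem_app q x k hkx hk)

lemma pvAgree (l : List String) :
    get_primary_traffic_direction l = get_primary_traffic_direction_alt l := by
  rcases eq_or_ne l [] with rfl | hl
  · rfl
  · unfold get_primary_traffic_direction get_primary_traffic_direction_alt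
    rw [if_neg hl, if_neg hl]
    dsimp only
    obtain ⟨hnd, hne, hmem, hbound⟩ := pvInv_holds l hl
    set st := l.foldl pvAltStep (PySem.Dict.empty, 0, PySem.Set.empty) with hst
    have hdict : l.foldl (fun d x => d.insert x (d.getD x 0 + 1)) PySem.Dict.empty
        = PySem.Dict.counter l := PySem.Dict.foldl_insert_getD_add_one_eq_counter l
    have hvals : (PySem.Dict.counter l).values
        = (PySem.Set.ofList l).map (fun k => (l.count k : Int)) := by
      simp only [PySem.Dict.values, PySem.Dict.items_counter, List.map_map]
      rfl
    obtain ⟨k0, hk0⟩ := List.exists_mem_of_ne_nil st.2.2 hne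
    obtain ⟨hk0l, hk0c⟩ := (hmem k0).1 hk0
    -- A's max(values) is B's running max
    have hmax : PySem.List.max? (PySem.Dict.counter l).values (fun v => v) = some st.2.1 := by
      cases hm : PySem.List.max? (PySem.Dict.counter l).values (fun v => v) with
      | none =>
        rw [PySem.List.max?_eq_none_iff] at hm
        rw [hvals] at hm
        have : k0 ∈ PySem.Set.ofList l := (PySem.Set.mem_ofList _ _).2 hk0l
        simp [List.map_eq_nil_iff] at hm
        rw [hm] at this; simp at this
      | some mA =>
        have hmem' : mA ∈ (PySem.Dict.counter l).values := PySem.List.max?_mem hm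
        rw [hvals] at hmem'
        obtain ⟨k1, hk1S, hk1⟩ := List.mem_map.1 hmem'
        have hk1l : k1 ∈ l := (PySem.Set.mem_ofList _ _).1 hk1S
        have h1 : mA ≤ st.2.1 := hk1 ▸ hbound k1 hk1l
        have h2 : st.2.1 ≤ mA := by
          have : (l.count k0 : Int) ∈ (PySem.Dict.counter l).values := by
            rw [hvals]
            exact List.mem_map.2 ⟨k0, (PySem.Set.mem_ofList _ _).2 hk0l, rfl⟩
          have := PySem.List.max?_isMax hm _ this
          simpa [hk0c] using this
        rw [le_antisymm h1 h2]
    rw [hdict, hmax]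
    -- A's most_common list has exactly the members of B's leaders, and no duplicates
    have hitems : ((PySem.Dict.counter l).items.filter (fun p => p.2 == st.2.1)).map (fun p => p.1)
        = (PySem.Set.ofList l).filter (fun k => (l.count k : Int) == st.2.1) := by
      rw [PySem.Dict.items_counter, List.filter_map, List.map_map]
      simp [Function.comp_def]
    set most := ((PySem.Dict.counter l).items.filter (fun p => p.2 == st.2.1)).map (fun p => p.1) with hmost
    have hmostnd : most.Nodup := by
      rw [hitems]; exact (PySem.Set.nodup_ofList l).filter _
    have hmostmem : ∀ k, k ∈ most ↔ k ∈ st.2.2 := by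
      intro k
      rw [hitems, List.mem_filter, hmem k, PySem.Set.mem_ofList]
      simp [beq_iff_eq]
    have hperm : most.Perm st.2.2 := (List.perm_ext_iff_of_nodup hmostnd hnd).2 hmostmem
    have hlen : most.length = st.2.2.length := hperm.length_eq
    simp only [PySem.Set.len]
    by_cases h1 : most.length = 1
    · have h1' : st.2.2.length = 1 := hlen ▸ h1
      have h2 : ((st.2.2.length : Int) = 1) := by exact_mod_cast h1'
      rw [if_pos h1, if_pos h2]
      obtain ⟨a, ha⟩ := List.length_eq_one_iff.1 h1
      obtain ⟨b, hb⟩ := List.length_eq_one_iff.1 h1'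
      have hab : a = b := by
        have : a ∈ st.2.2 := (hmostmem a).1 (by simp [ha])
        rw [hb] at this; simpa using this
      rw [← hmost, ha, hb, hab]
      simp [PySem.List.pyGetD, PySem.List.pyGet?, PySem.List.pyIdx?]
    · have h1' : st.2.2.length ≠ 1 := fun hc => h1 (by rw [hlen, hc])
      have h2 : ¬((st.2.2.length : Int) = 1) := fun hc => h1' (by exact_mod_cast hc)
      rw [if_neg h1, if_neg h2]

-- ===== VERDICT (by name: the statement is the Claim_ definition above) =====
theorem get_primary_traffic_direction_spec : Claim_equal_get_primary_traffic_direction := by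
  intro l _
  unfold Spec_get_primary_traffic_direction
  exact pvAgree l
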